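-- pv_equiv track=rewrite | github.com/Prateek-Giree/Advent-of-code-2015- | Day8/Part2/Matchsticks2.py | total_newly_encoded_string
-- ===== SOURCE A (Python) =====
-- def total_newly_encoded_string(data):
--     total = 0
--     mylist = data.split("\n")
--     for line in mylist:
--         total += 2  # Add 2 for the surrounding double quotes
--         for i in range(len(line)):
--             if line[i] == '"':
--                 total += 2
--             elif line[i] == "\\":
--                 total += 2
--             else:
--                 total += 1
--     return total
-- ===== SOURCE B (Python) =====
-- def total_newly_encoded_string(data):
--     # Closed form: each of the (count('\n')+1) lines contributes 2 surrounding
--     # quotes plus its own length, and each '"' or '\' costs one extra escape char.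
--     return len(data) + (data.count("\n") + 1) + 1 + data.count('"') + data.count("\\")
-- ===== Notes on version B (the rewrite author's own statement) =====
-- stated objective: simpler
-- what changed: Replaces the per-line, per-character loop with a one-line closed-form formula: total string length plus number of lines plus one plus whole-string counts of quote and backslash characters.
import Mathlib
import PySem

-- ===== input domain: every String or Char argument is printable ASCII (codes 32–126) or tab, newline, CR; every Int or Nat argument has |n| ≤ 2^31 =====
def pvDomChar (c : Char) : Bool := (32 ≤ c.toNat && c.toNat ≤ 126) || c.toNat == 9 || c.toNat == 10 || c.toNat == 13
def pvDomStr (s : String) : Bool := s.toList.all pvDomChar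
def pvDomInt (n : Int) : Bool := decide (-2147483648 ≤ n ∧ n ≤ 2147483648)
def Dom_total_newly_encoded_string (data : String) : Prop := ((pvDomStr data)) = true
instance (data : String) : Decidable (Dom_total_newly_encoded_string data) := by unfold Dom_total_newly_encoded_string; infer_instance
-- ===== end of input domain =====

-- B replaces A's per-line, per-character counting loop by a one-line closed-form
-- arithmetic formula over the whole string's length and character counts (objective: simpler).

-- ===== PORT A =====
-- the inner 'for i in range(len(line)):' loop of A, starting from total+2 ('total += 2')
def encInnerLoop (total : Int) (line : List Char) : Int :=
  (PySem.List.pyRange 0 (PySem.List.len line) 1).foldl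
    (fun total i =>
      if PySem.List.pyGetD line i ' ' = '\"' then total + 2
      else if PySem.List.pyGetD line i ' ' = '\\' then total + 2
      else total + 1)
    (total + 2)

def total_newly_encoded_string (data : String) : Int :=
  (PySem.Chars.splitOn data.toList "\n".toList).foldl encInnerLoop 0

-- ===== PORT B =====
def total_newly_encoded_string_alt (data : String) : Int :=
  PySem.Str.len data + ((PySem.Str.count data "\n" : Int) + 1) + 1
    + (PySem.Str.count data "\"" : Int) + (PySem.Str.count data "\\" : Int)

-- ===== PRECONDITION & SPEC =====
def Spec_total_newly_encoded_string (data : String) (out : Int) : Prop := out = total_newly_encoded_string_alt data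
instance (data : String) (out : Int) : Decidable (Spec_total_newly_encoded_string data out) := by unfold Spec_total_newly_encoded_string; infer_instance

-- ===== CLAIM (what is proved, stated in full; the proofs are below) =====
def Claim_equal_total_newly_encoded_string : Prop := ∀ (data : String), Dom_total_newly_encoded_string data → Spec_total_newly_encoded_string data (total_newly_encoded_string data)

-- ===== LEMMAS AND PROOFS =====

-- structural model of data.split("\n"): split a char list at '\n'
def consHead (x : List Char) : List (List Char) → List (List Char)
  | [] => [x]
  | h :: t => (x ++ h) :: t

def linesBy : List Char → List (List Char)
  | [] => [[]]
  | c :: rest => if c = '\n' then [] :: linesBy rest else consHead [c] (linesBy rest)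

lemma linesBy_ne_nil (l : List Char) : linesBy l ≠ [] := by
  cases l with
  | nil => simp [linesBy]
  | cons c rest =>
    by_cases hc : c = '\n'
    · simp [linesBy, hc]
    · simp only [linesBy, if_neg hc]
      cases linesBy rest <;> simp [consHead]

lemma consHead_nil (ys : List (List Char)) (h : ys ≠ []) : consHead [] ys = ys := by
  cases ys with
  | nil => exact absurd rfl h
  | cons a t => simp [consHead]

lemma consHead_consHead (a b : List Char) (ys : List (List Char)) :
    consHead a (consHead b ys) = consHead (a ++ b) ys := by
  cases ys <;> simp [consHead]

lemma length_consHead (a : List Char) (ys : List (List Char)) (h : ys ≠ []) :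
    (consHead a ys).length = ys.length := by
  cases ys with
  | nil => exact absurd rfl h
  | cons b t => simp [consHead]

lemma sum_map_length_consHead (a : List Char) (ys : List (List Char)) (h : ys ≠ []) :
    ((consHead a ys).map List.length).sum = a.length + (ys.map List.length).sum := by
  cases ys with
  | nil => exact absurd rfl h
  | cons b t => simp [consHead]; omega

lemma sum_map_countP_consHead (p : Char → Bool) (a : List Char) (ys : List (List Char)) (h : ys ≠ []) :
    ((consHead a ys).map (fun s => s.countP p)).sum = a.countP p + (ys.map (fun s => s.countP p)).sum := by
  cases ys with
  | nil => exact absurd rfl h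
  | cons b t => simp [consHead, List.countP_append]; omega

lemma go_nl : ∀ (fuel : Nat) (l cur : List Char) (acc : List (List Char)), l.length < fuel →
    PySem.Chars.splitOn.go ['\n'] fuel l cur acc = acc.reverse ++ consHead cur.reverse (linesBy l) := by
  intro fuel
  induction fuel with
  | zero => intro l cur acc h; exact absurd h (Nat.not_lt_zero _)
  | succ f ih =>
    intro l cur acc h
    cases l with
    | nil => simp [PySem.Chars.splitOn.go, linesBy, consHead]
    | cons c rest =>
      by_cases hc : c = '\n'
      · subst hc
        rw [show PySem.Chars.splitOn.go ['\n'] (f + 1) ('\n' :: rest) cur acc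
              = PySem.Chars.splitOn.go ['\n'] f rest [] (cur.reverse :: acc) from by
            simp [PySem.Chars.splitOn.go, List.isPrefixOf]]
        rw [ih rest [] (cur.reverse :: acc) (by simp only [List.length_cons] at h; omega)]
        simp only [List.reverse_nil]
        rw [consHead_nil _ (linesBy_ne_nil rest)]
        simp [linesBy, consHead]
      · have hcb : ('\n' == c) = false := beq_eq_false_iff_ne.mpr (Ne.symm hc)
        rw [show PySem.Chars.splitOn.go ['\n'] (f + 1) (c :: rest) cur acc
              = PySem.Chars.splitOn.go ['\n'] f rest (c :: cur) acc from by
            simp [PySem.Chars.splitOn.go, List.isPrefixOf, hcb]]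
        rw [ih rest (c :: cur) acc (by simp only [List.length_cons] at h; omega)]
        simp [linesBy, hc, consHead_consHead]

lemma splitOn_nl (L : List Char) : PySem.Chars.splitOn L ['\n'] = linesBy L := by
  unfold PySem.Chars.splitOn
  rw [go_nl (L.length + 1) L [] [] (by omega)]
  simp [consHead_nil _ (linesBy_ne_nil L)]

lemma countgo_single (x : Char) : ∀ (fuel : Nat) (l : List Char) (acc : Nat), l.length ≤ fuel →
    PySem.Chars.count.go [x] fuel l acc = acc + l.count x := by
  intro fuel
  induction fuel with
  | zero =>
    intro l acc h
    have hl : l = [] := List.eq_nil_of_length_eq_zero (Nat.le_zero.mp h)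
    subst hl
    simp [PySem.Chars.count.go]
  | succ f ih =>
    intro l acc h
    cases l with
    | nil => simp [PySem.Chars.count.go]
    | cons c t =>
      by_cases hc : x = c
      · subst hc
        rw [show PySem.Chars.count.go [x] (f + 1) (x :: t) acc
              = PySem.Chars.count.go [x] f t (acc + 1) from by
            simp [PySem.Chars.count.go, List.isPrefixOf]]
        rw [ih t (acc + 1) (by simp only [List.length_cons] at h; omega)]
        simp
        omega
      · have hcb : (x == c) = false := beq_eq_false_iff_ne.mpr hc
        rw [show PySem.Chars.count.go [x] (f + 1) (c :: t) acc
              = PySem.Chars.count.go [x] f t acc from by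
            simp [PySem.Chars.count.go, List.isPrefixOf, hcb]]
        rw [ih t acc (by simp only [List.length_cons] at h; omega)]
        have hcb' : (c == x) = false := beq_eq_false_iff_ne.mpr (fun e => hc e.symm)
        simp [List.count_cons, hcb']

lemma count_single (x : Char) (L : List Char) : PySem.Chars.count L [x] = L.count x := by
  rw [show PySem.Chars.count L [x] = PySem.Chars.count.go [x] L.length L 0 from by
    simp [PySem.Chars.count]]
  simpa using countgo_single x L.length L 0 le_rfl

lemma inner_fold (l : List Char) : ∀ t : Int,
    l.foldl (fun total c => if c = '\"' then total + 2 else if c = '\\' then total + 2 else total + 1) t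
      = t + (l.length : Int) + (l.countP (fun c => c == '\"' || c == '\\') : Int) := by
  induction l with
  | nil => intro t; simp
  | cons c rest ih =>
    intro t
    simp only [List.foldl_cons, ih, List.countP_cons, List.length_cons]
    by_cases h1 : c = '\"'
    · simp [h1]; ring
    · by_cases h2 : c = '\\'
      · simp [h2]; ring
      · simp [h1, h2]; ring

lemma encInnerLoop_eq (t : Int) (l : List Char) :
    encInnerLoop t l
      = t + 2 + (l.length : Int) + (l.countP (fun c => c == '\"' || c == '\\') : Int) := by
  unfold encInnerLoop
  simp only [PySem.List.len_eq]
  exact (PySem.List.foldl_pyRange_zero_pyGetD' l ' '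
    (fun total c => if c = '\"' then total + 2 else if c = '\\' then total + 2 else total + 1)
    (t + 2)).trans (inner_fold l (t + 2))

lemma foldA (ls : List (List Char)) : ∀ t : Int,
    ls.foldl encInnerLoop t
      = t + 2 * (ls.length : Int) + ((ls.map List.length).sum : Int)
        + (Nat.cast ((ls.map (fun s => s.countP (fun c => c == '\"' || c == '\\'))).sum) : Int) := by
  induction ls with
  | nil => intro t; simp
  | cons l ls ih =>
    intro t
    simp only [List.foldl_cons, ih, encInnerLoop_eq, List.map_cons, List.sum_cons, List.length_cons]
    push_cast
    ring

lemma len_linesBy (l : List Char) : (linesBy l).length = l.count '\n' + 1 := by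
  induction l with
  | nil => simp [linesBy]
  | cons c rest ih =>
    by_cases hc : c = '\n'
    · subst hc; simp [linesBy, ih]
    · have hcb : (c == '\n') = false := beq_eq_false_iff_ne.mpr hc
      simp [linesBy, hc, length_consHead _ _ (linesBy_ne_nil rest), ih]

lemma sum_len_linesBy (l : List Char) :
    ((linesBy l).map List.length).sum + l.count '\n' = l.length := by
  induction l with
  | nil => simp [linesBy]
  | cons c rest ih =>
    by_cases hc : c = '\n'
    · subst hc
      simp [linesBy]; omega
    · have hcb : (c == '\n') = false := beq_eq_false_iff_ne.mpr hc
      simp [linesBy, hc, sum_map_length_consHead _ _ (linesBy_ne_nil rest)]; omega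

lemma sum_countP_linesBy (l : List Char) :
    ((linesBy l).map (fun s => s.countP (fun c => c == '\"' || c == '\\'))).sum
      = l.countP (fun c => c == '\"' || c == '\\') := by
  induction l with
  | nil => simp [linesBy]
  | cons c rest ih =>
    by_cases hc : c = '\n'
    · subst hc
      simp only [linesBy, List.countP_cons]
      simp
      exact ih
    · simp only [linesBy, if_neg hc,
        sum_map_countP_consHead _ _ _ (linesBy_ne_nil rest), ih, List.countP_cons, List.countP_nil]
      omega

lemma countP_split (l : List Char) :
    l.countP (fun c => c == '\"' || c == '\\') = l.count '\"' + l.count '\\' := by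
  induction l with
  | nil => simp
  | cons c rest ih =>
    simp only [List.countP_cons, List.count_cons, ih]
    by_cases h1 : c = '\"'
    · subst h1; simp; omega
    · by_cases h2 : c = '\\'
      · subst h2; simp; omega
      · have h1b : (c == '\"') = false := beq_eq_false_iff_ne.mpr h1
        have h2b : (c == '\\') = false := beq_eq_false_iff_ne.mpr h2
        simp [h1b, h2b]

lemma main_eq (data : String) :
    total_newly_encoded_string data = total_newly_encoded_string_alt data := by
  have e1 : "\n".toList = ['\n'] := rfl
  have e2 : "\"".toList = ['\"'] := rfl
  have e3 : "\\".toList = ['\\'] := rfl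
  unfold total_newly_encoded_string total_newly_encoded_string_alt
  simp only [PySem.Str.count_eq, PySem.Str.len_eq, e1, e2, e3]
  rw [splitOn_nl, foldA, count_single, count_single, count_single]
  have h1 := len_linesBy data.toList
  have h2 := sum_len_linesBy data.toList
  have h3 := sum_countP_linesBy data.toList
  have h4 := countP_split data.toList
  rw [h1, h3, h4]
  omega

-- ===== VERDICT (by name: the statement is the Claim_ definition above) =====
theorem total_newly_encoded_string_spec : Claim_equal_total_newly_encoded_string := by
  intro data _
  unfold Spec_total_newly_encoded_string
  exact main_eq data
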